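-- pv_equiv track=rewrite | github.com/andreearusr/University | Anul 1/Semestrul 1/FP/ProblemeSiProiecte/programare dinamica/greedy.py | greedy_coins
-- ===== SOURCE A (Python) =====
-- def suma(l):
--     s = 0
--     for el in l:
--         s = s + el
--     return s
--
-- def solution(sol,limit):
--     return suma(sol)==limit
--
-- def selectMostPromissing(candidates):
--     return max(candidates)
--
-- def acceptable(element,solution,limit):
--     return suma(solution)+element<=limit
--
-- def greedy_coins(coins,Sum):
--     sol =[]
--     while not solution(sol,Sum) and coins!=[]:
--         candidat = selectMostPromissing(coins)
--         coins.remove(candidat)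
--         if acceptable(candidat,sol,Sum):
--             sol.append(candidat)
--
--     if solution(sol,Sum):
--         return sol
--     return None
-- ===== SOURCE B (Python) =====
-- def greedy_coins(coins, Sum):
--     # Return-value equivalent to A; unlike A it does not mutate `coins`.
--     sol = []
--     s = 0
--     for c in sorted(coins, reverse=True):
--         if s == Sum:
--             break
--         if s + c <= Sum:
--             sol.append(c)
--             s += c
--     return sol if s == Sum else None
-- ===== Notes on version B (the rewrite author's own statement) =====
-- stated objective: faster
-- what changed: Replaces A's repeated max()+list.remove() scan of the remaining coins by a single descending sort followed by one pass with an incrementally maintained running sum.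
import Mathlib
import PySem

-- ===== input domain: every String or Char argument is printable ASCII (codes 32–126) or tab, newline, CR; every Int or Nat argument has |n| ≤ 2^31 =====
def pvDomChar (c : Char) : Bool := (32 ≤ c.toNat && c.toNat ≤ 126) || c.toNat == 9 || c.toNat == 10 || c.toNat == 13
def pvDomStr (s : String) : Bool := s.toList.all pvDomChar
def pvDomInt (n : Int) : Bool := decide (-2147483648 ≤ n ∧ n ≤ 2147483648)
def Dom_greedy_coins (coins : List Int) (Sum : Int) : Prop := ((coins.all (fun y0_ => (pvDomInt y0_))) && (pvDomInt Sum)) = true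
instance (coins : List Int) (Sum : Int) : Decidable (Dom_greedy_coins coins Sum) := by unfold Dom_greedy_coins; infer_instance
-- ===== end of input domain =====

-- B sorts the coins descending once and keeps a running sum, replacing A's repeated
-- max+remove scan (O(n^2)) by O(n log n); return-value equivalence only: A empties
-- the caller's `coins` list in place, B does not mutate it.

-- ===== PORT A =====
-- suma(l): explicit accumulating loop
def suma (l : List Int) : Int := l.foldl (fun s el => s + el) 0

-- used by the port's own termination proof (coins.remove shrinks the list)
theorem remove?_length_lt (xs : List Int) (v : Int) (ys : List Int)
    (h : PySem.List.remove? xs v = some ys) : ys.length < xs.length := by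
  have hv : v ∈ xs := by
    by_contra hnv
    rw [(PySem.List.remove?_eq_none_iff xs v).mpr hnv] at h
    simp at h
  rw [PySem.List.remove?_eq_some_erase xs v hv] at h
  cases h
  have h1 := List.length_erase_of_mem hv
  have h2 := List.length_pos_of_mem hv
  omega

-- the while loop of A: candidat = max(coins); coins.remove(candidat); maybe append
def greedyLoopA (coins : List Int) (sol : List Int) (Sum : Int) : List Int :=
  if suma sol = Sum then sol
  else
    match hm : PySem.List.max? coins (fun x => x) with
    | none => sol        -- coins == [] : loop exits
    | some m =>
      match hr : PySem.List.remove? coins m with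
      | none => sol      -- unreachable: m ∈ coins
      | some coins' =>
        if suma sol + m ≤ Sum then greedyLoopA coins' (sol ++ [m]) Sum
        else greedyLoopA coins' sol Sum
termination_by coins.length
decreasing_by all_goals exact remove?_length_lt coins m coins' hr

def greedy_coins (coins : List Int) (Sum : Int) : Option (List Int) :=
  if suma (greedyLoopA coins [] Sum) = Sum then some (greedyLoopA coins [] Sum) else none

-- ===== PORT B =====
-- the for loop of B over the descending-sorted coins, state (s, sol)
def greedyLoopB (Sum : Int) : List Int → Int → List Int → Int × List Int
  | [], s, sol => (s, sol)
  | c :: t, s, sol =>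
    if s = Sum then (s, sol)
    else if s + c ≤ Sum then greedyLoopB Sum t (s + c) (sol ++ [c])
    else greedyLoopB Sum t s sol

def greedy_coins_alt (coins : List Int) (Sum : Int) : Option (List Int) :=
  if (greedyLoopB Sum (PySem.List.sorted coins (fun x => x) true) 0 []).1 = Sum
  then some (greedyLoopB Sum (PySem.List.sorted coins (fun x => x) true) 0 []).2 else none

-- ===== PRECONDITION & SPEC =====
def Spec_greedy_coins (coins : List Int) (Sum : Int) (out : Option (List Int)) : Prop := out = greedy_coins_alt coins Sum
instance (coins : List Int) (Sum : Int) (out : Option (List Int)) : Decidable (Spec_greedy_coins coins Sum out) := by unfold Spec_greedy_coins; infer_instance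

-- ===== CLAIM (what is proved, stated in full; the proofs are below) =====
def Claim_equal_greedy_coins : Prop := ∀ (coins : List Int) (Sum : Int), Dom_greedy_coins coins Sum → Spec_greedy_coins coins Sum (greedy_coins coins Sum)

-- ===== LEMMAS AND PROOFS =====

theorem suma_append_one (l : List Int) (m : Int) : suma (l ++ [m]) = suma l + m := by
  unfold suma
  rw [List.foldl_append]
  simp

-- the first component of B's loop state stays the sum of the second
theorem greedyLoopB_fst (Sum : Int) (l : List Int) :
    ∀ (s : Int) (sol : List Int), s = suma sol →
      (greedyLoopB Sum l s sol).1 = suma (greedyLoopB Sum l s sol).2 := by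
  induction l with
  | nil => intro s sol h; simpa [greedyLoopB] using h
  | cons c t ih =>
    intro s sol h
    by_cases h1 : s = Sum
    · simpa [greedyLoopB, h1] using h
    · by_cases h2 : s + c ≤ Sum
      · simpa [greedyLoopB, h1, h2] using
          ih (s + c) (sol ++ [c]) (by rw [suma_append_one, h])
      · simpa [greedyLoopB, h1, h2] using ih s sol h

-- pulling the maximum to the front of a descending sort
theorem sorted_desc_cons (coins : List Int) (m : Int)
    (hm : PySem.List.max? coins (fun x => x) = some m) :
    PySem.List.sorted coins (fun x => x) true =
      m :: PySem.List.sorted (coins.erase m) (fun x => x) true := by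
  have hmem : m ∈ coins := PySem.List.max?_mem hm
  have hmax : ∀ y ∈ coins, y ≤ m := by
    intro y hy; simpa using PySem.List.max?_isMax hm y hy
  apply List.Perm.eq_of_pairwise (le := fun a b : Int => b ≤ a)
    (fun a b _ _ h1 h2 => le_antisymm h2 h1)
    (by simpa using PySem.List.sorted_pairwise_rev coins (fun x => x))
    (by refine List.Pairwise.cons ?_ (by simpa using PySem.List.sorted_pairwise_rev (coins.erase m) (fun x => x))
        intro y hy
        exact hmax y (coins.erase_subset ((PySem.List.mem_sorted ..).mp hy)))
  exact ((PySem.List.sorted_perm ..).trans (List.perm_cons_erase hmem)).trans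
    (List.Perm.cons m (PySem.List.sorted_perm ..)).symm

-- A's max-and-remove loop computes exactly B's fold over the descending sort
theorem loopA_eq_loopB (Sum : Int) :
    ∀ (n : ℕ) (coins sol : List Int), coins.length = n →
      greedyLoopA coins sol Sum =
        (greedyLoopB Sum (PySem.List.sorted coins (fun x => x) true) (suma sol) sol).2 := by
  intro n
  induction n using Nat.strong_induction_on with
  | _ n ih =>
    intro coins sol hlen
    by_cases hdone : suma sol = Sum
    · rw [greedyLoopA, if_pos hdone]
      cases hs : PySem.List.sorted coins (fun x => x) true with
      | nil => simp [greedyLoopB]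
      | cons c t => simp [greedyLoopB, hdone]
    · cases coins with
      | nil =>
        rw [greedyLoopA, if_neg hdone]
        rfl
      | cons c0 t0 =>
        obtain ⟨m, hm⟩ : ∃ m, PySem.List.max? (c0 :: t0) (fun x => x) = some m := by
          cases hmx : PySem.List.max? (c0 :: t0) (fun x => x) with
          | none => exact absurd ((PySem.List.max?_eq_none_iff ..).mp hmx) (by simp)
          | some m => exact ⟨m, rfl⟩
        have hmem : m ∈ (c0 :: t0) := PySem.List.max?_mem hm
        have hrem : PySem.List.remove? (c0 :: t0) m = some ((c0 :: t0).erase m) :=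
          PySem.List.remove?_eq_some_erase _ m hmem
        have hlt : ((c0 :: t0).erase m).length < n := by
          have h1 := List.length_erase_of_mem hmem
          have h2 := List.length_pos_of_mem hmem
          omega
        rw [greedyLoopA, if_neg hdone]
        split
        · next heq => rw [hm] at heq; simp at heq
        · next m' heq =>
          rw [hm] at heq
          injection heq with heq; subst heq
          split
          · next heq2 => rw [hrem] at heq2; simp at heq2
          · next coins' heq2 =>
            rw [hrem] at heq2
            injection heq2 with heq2; subst heq2
            rw [sorted_desc_cons (c0 :: t0) m hm]
            by_cases hacc : suma sol + m ≤ Sum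
            · rw [if_pos hacc, greedyLoopB, if_neg hdone, if_pos hacc]
              rw [← suma_append_one sol m]
              exact ih _ hlt _ _ rfl
            · rw [if_neg hacc, greedyLoopB, if_neg hdone, if_neg hacc]
              exact ih _ hlt _ _ rfl

-- ===== VERDICT (by name: the statement is the Claim_ definition above) =====
theorem greedy_coins_spec : Claim_equal_greedy_coins := by
  intro coins Sum _
  unfold Spec_greedy_coins greedy_coins greedy_coins_alt
  have hA := loopA_eq_loopB Sum coins.length coins [] rfl
  have hfst := greedyLoopB_fst Sum (PySem.List.sorted coins (fun x => x) true) (suma [])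
    [] (by simp [suma])
  simp only [show suma ([] : List Int) = 0 from rfl] at hA hfst
  rw [hA, hfst]
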